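-- pv_equiv track=rewrite | github.com/evangelistalab/qforte | src/qforte/ucc/ucc_helpers.py | cse
-- ===== SOURCE A (Python) =====
-- def cse(sq_term):
--     dn_idx = len(sq_term)-1
--     for up_idx in range(int(len(sq_term) / 2)):
--         if((sq_term[up_idx] % 2) != (sq_term[dn_idx] % 2)):
--             return 0
--         else:
--             dn_idx -= 1
--     return 1
-- ===== SOURCE B (Python) =====
-- def cse(sq_term):
--     p = [x % 2 for x in sq_term]
--     return int(p == p[::-1])
-- ===== Notes on version B (the rewrite author's own statement) =====
-- stated objective: simpler
-- what changed: Replaces the two-index front/back loop with early return by building the parity list once and comparing it with its reverse by a single equality.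
import Mathlib
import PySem

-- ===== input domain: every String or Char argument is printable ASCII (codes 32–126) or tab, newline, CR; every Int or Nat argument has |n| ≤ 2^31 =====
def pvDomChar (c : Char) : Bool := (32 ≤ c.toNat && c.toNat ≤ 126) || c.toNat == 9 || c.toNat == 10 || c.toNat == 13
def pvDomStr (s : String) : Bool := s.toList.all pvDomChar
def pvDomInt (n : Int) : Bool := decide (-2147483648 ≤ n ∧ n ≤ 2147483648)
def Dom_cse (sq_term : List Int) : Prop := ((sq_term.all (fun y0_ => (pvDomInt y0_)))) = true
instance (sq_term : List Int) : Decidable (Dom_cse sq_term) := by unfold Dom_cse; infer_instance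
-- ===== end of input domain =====

-- B replaces A's front/back two-index loop with early return by a parity map compared with its reverse (objective: simpler).

-- ===== PORT A =====
-- the for-loop with early return, as structural recursion on the remaining iteration count
def cseAux (sq : List Int) (up dn : Int) : Nat → Int
  | 0 => 1
  | k + 1 =>
    match PySem.List.pyGet? sq up, PySem.List.pyGet? sq dn with
    | some a, some b =>
      if PySem.Int.mod a 2 ≠ PySem.Int.mod b 2 then 0
      else cseAux sq (up + 1) (dn - 1) k
    | _, _ => 0   -- IndexError: unreachable, indices always in range

def cse (sq_term : List Int) : Int :=
  cseAux sq_term 0 ((sq_term.length : Int) - 1) (sq_term.length / 2)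

-- ===== PORT B =====
def cse_alt (sq_term : List Int) : Int :=
  let p := sq_term.map (fun x => PySem.Int.mod x 2)
  if p = p.reverse then 1 else 0

-- ===== PRECONDITION & SPEC =====
def Spec_cse (sq_term : List Int) (out : Int) : Prop := out = cse_alt sq_term
instance (sq_term : List Int) (out : Int) : Decidable (Spec_cse sq_term out) := by unfold Spec_cse; infer_instance

-- ===== CLAIM (what is proved, stated in full; the proofs are below) =====
def Claim_equal_cse : Prop := ∀ (sq_term : List Int), Dom_cse sq_term → Spec_cse sq_term (cse sq_term)

-- ===== LEMMAS AND PROOFS =====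

-- A's loop decides the pairwise parity condition on the window it still has to visit
theorem cseAux_eq (sq : List Int) (k u : Nat) (h : u + k ≤ sq.length / 2) :
    cseAux sq (u : Int) ((sq.length : Int) - 1 - u) k =
      if (∀ j < k, (sq.map (fun x => PySem.Int.mod x 2))[u + j]! =
          (sq.map (fun x => PySem.Int.mod x 2))[sq.length - 1 - (u + j)]!) then 1 else 0 := by
  induction k generalizing u with
  | zero => simp [cseAux]
  | succ k ih =>
    have hn : u < sq.length := by omega
    have hdn : sq.length - 1 - u < sq.length := by omega
    have h1 : PySem.List.pyGet? sq (u : Int) = some (sq[u]'hn) :=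
      PySem.List.pyGet?_ofNat sq u hn
    have hcast : ((sq.length : Int) - 1 - u) = ((sq.length - 1 - u : Nat) : Int) := by omega
    have h2 : PySem.List.pyGet? sq ((sq.length : Int) - 1 - u) = some (sq[sq.length - 1 - u]'hdn) := by
      rw [hcast]; exact PySem.List.pyGet?_ofNat sq _ hdn
    have hg1 : (sq.map (fun x => PySem.Int.mod x 2))[u + 0]! = PySem.Int.mod (sq[u]'hn) 2 := by
      rw [getElem!_pos _ _ (by simpa using hn)]; simp
    have hg2 : (sq.map (fun x => PySem.Int.mod x 2))[sq.length - 1 - (u + 0)]! =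
        PySem.Int.mod (sq[sq.length - 1 - u]'hdn) 2 := by
      rw [getElem!_pos _ _ (by simpa using hdn)]; simp
    rw [show cseAux sq (u : Int) ((sq.length : Int) - 1 - u) (k + 1) =
        (if PySem.Int.mod (sq[u]'hn) 2 ≠ PySem.Int.mod (sq[sq.length - 1 - u]'hdn) 2 then 0
         else cseAux sq ((u : Int) + 1) ((sq.length : Int) - 1 - u - 1) k) by
      simp [cseAux, h1, h2]]
    by_cases hne : PySem.Int.mod (sq[u]'hn) 2 = PySem.Int.mod (sq[sq.length - 1 - u]'hdn) 2
    · have hrec : ((u : Int) + 1) = ((u + 1 : Nat) : Int) := by omega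
      have hrec2 : ((sq.length : Int) - 1 - u - 1) = ((sq.length : Int) - 1 - (u + 1 : Nat)) := by
        push_cast; ring
      rw [if_neg (by simpa using hne), hrec, hrec2, ih (u + 1) (by omega)]
      apply if_congr _ rfl rfl
      constructor
      · intro hall j hj
        rcases Nat.eq_zero_or_pos j with rfl | hjpos
        · rw [hg1, hg2, hne]
        · have hh := hall (j - 1) (by omega)
          rwa [show u + 1 + (j - 1) = u + j by omega] at hh
      · intro hall j hj
        have hh := hall (j + 1) (by omega)
        rwa [show u + (j + 1) = u + 1 + j by omega] at hh
    · rw [if_pos (by simpa using hne)]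
      rw [if_neg]
      intro hall
      exact hne (by rw [← hg1, ← hg2]; exact hall 0 (by omega))

-- a list equals its reverse iff the first half matches the mirrored second half
theorem pal_iff (l : List Int) :
    l = l.reverse ↔ ∀ j < l.length / 2, l[j]! = l[l.length - 1 - (0 + j)]! := by
  constructor
  · intro hpal j hj
    have hjl : j < l.length := by omega
    have hjr : l.length - 1 - (0 + j) < l.length := by omega
    rw [getElem!_pos l j hjl, getElem!_pos l (l.length - 1 - (0 + j)) hjr,
      List.getElem_of_eq hpal hjl, List.getElem_reverse]
    congr 1
    omega
  · intro hall
    have key : ∀ j, j < l.length / 2 → l[j]! = l[l.length - 1 - j]! := by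
      intro j hj
      have := hall j hj
      rwa [show l.length - 1 - (0 + j) = l.length - 1 - j by omega] at this
    apply List.ext_getElem (by simp)
    intro i hi hi'
    simp only [List.length_reverse] at hi'
    rw [List.getElem_reverse,
      ← getElem!_pos l i hi, ← getElem!_pos l (l.length - 1 - i) (by omega)]
    by_cases hc : i < l.length / 2
    · exact key i hc
    · by_cases hc2 : l.length - 1 - i < l.length / 2
      · have := key (l.length - 1 - i) hc2
        rw [show l.length - 1 - (l.length - 1 - i) = i by omega] at this
        exact this.symm
      · rw [show l.length - 1 - i = i by omega]

-- ===== VERDICT (by name: the statement is the Claim_ definition above) =====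
theorem cse_spec : Claim_equal_cse := by
  intro sq _
  unfold Spec_cse cse cse_alt
  have h0 : ((0 : Nat) : Int) = (0 : Int) := rfl
  rw [show ((sq.length : Int) - 1) = ((sq.length : Int) - 1 - ((0 : Nat) : Int)) by simp,
    ← h0, cseAux_eq sq (sq.length / 2) 0 (by omega)]
  apply if_congr _ rfl rfl
  rw [pal_iff (sq.map (fun x => PySem.Int.mod x 2))]
  simp only [List.length_map]
  constructor <;> (intro hall j hj; have := hall j hj; simpa using this)
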